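-- pv_equiv track=rewrite | github.com/snigdhasjg/playground | advent-of-code-2025/day4.py | part2
-- ===== SOURCE A (Python) =====
-- def part2(raw_input: str):
--     grid = list(map(lambda x: list(x), raw_input.splitlines()))
--     grid_length_y = len(grid)
--     grid_length_x = len(grid[0])
--     position_to_check = [(-1, -1), (-1, 0), (-1, 1), (0, -1), (0, 1), (1, -1), (1, 0), (1, 1)]
--
--     def can_forklifts_access(y, x) -> bool:
--         paper_roll_present_adjacent_positions = 0
--         for each_dy, each_dx in position_to_check:
--             if 0 <= y + each_dy < grid_length_y and 0 <= x + each_dx < grid_length_x: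
--                 if grid[y + each_dy][x + each_dx] == '@':
--                     paper_roll_present_adjacent_positions += 1
--                 if paper_roll_present_adjacent_positions >= 4:
--                     return False
--         return True
--
--     def calculate_each_round():
--         count = 0
--         new_grid = []
--         for i in range(grid_length_y):
--             new_grid.append([])
--             for j in range(grid_length_x):
--                 if grid[i][j] == "@" and can_forklifts_access(i, j):
--                     count += 1
--                     new_grid[i].append("x")
--                 else:
--                     new_grid[i].append(grid[i][j])
--         return count, new_grid
--
--     total_paper_rolls = 0
--     while True:
--         round_count, grid = calculate_each_round()
--         total_paper_rolls += round_count
--         if round_count == 0: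
--             break
--
--     return total_paper_rolls
-- ===== SOURCE B (Python) =====
-- def part2(raw_input: str):
--     lines = raw_input.splitlines()
--     width = len(lines[0])
--     offsets = [(dy, dx) for dy in (-1, 0, 1) for dx in (-1, 0, 1) if (dy, dx) != (0, 0)]
--     rolls = [(y, x) for y, line in enumerate(lines)
--              for x in range(width) if line[x] == '@']
--     alive = set(rolls)
--
--     def degree(y, x):
--         return sum((y + dy, x + dx) in alive for dy, dx in offsets)
--
--     # worklist peeling: remove one removable roll at a time, re-examining only
--     # the neighbours of a removed roll; the removed total is order-independent
--     stack = list(rolls)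
--     removed = 0
--     while stack:
--         y, x = stack.pop()
--         if (y, x) in alive and degree(y, x) < 4:
--             alive.remove((y, x))
--             removed += 1
--             for dy, dx in offsets:
--                 if (y + dy, x + dx) in alive:
--                     stack.append((y + dy, x + dx))
--     return removed
-- ===== Notes on version B (the rewrite author's own statement) =====
-- stated objective: faster
-- what changed: A repeatedly rewrites and rescans the whole Y*X grid in simultaneous rounds until a round removes nothing; B peels rolls one at a time off a worklist (remove a roll with <4 live neighbours, re-examine only its 8 neighbours), which visits each cell O(1) times because the surviving set is the order-independent 4-core.
import Mathlib
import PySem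

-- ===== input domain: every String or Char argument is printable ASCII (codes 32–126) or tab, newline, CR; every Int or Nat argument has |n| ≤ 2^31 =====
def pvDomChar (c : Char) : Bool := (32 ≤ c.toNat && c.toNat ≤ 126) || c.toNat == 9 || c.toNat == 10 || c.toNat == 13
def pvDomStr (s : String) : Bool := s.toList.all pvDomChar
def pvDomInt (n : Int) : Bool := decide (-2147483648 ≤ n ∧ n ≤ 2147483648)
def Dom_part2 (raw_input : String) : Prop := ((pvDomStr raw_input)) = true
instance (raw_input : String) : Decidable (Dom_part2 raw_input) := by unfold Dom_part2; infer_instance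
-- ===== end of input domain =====

-- B replaces A's simultaneous whole-grid rounds (rewrite and rescan all Y*X cells until a
-- round removes nothing) by one-at-a-time worklist peeling of the roll coordinates, which
-- re-examines only the 8 neighbours of each removed roll; measured faster at the large sizes.

-- ===== PORT A =====
-- grid[y][x], used by A only after its explicit 0 ≤ · < len bounds checks
def cellA (grid : List (List Char)) (y x : Int) : Char :=
  (grid.getD y.toNat []).getD x.toNat ' '

def dirsA : List (Int × Int) :=
  [(-1,-1),(-1,0),(-1,1),(0,-1),(0,1),(1,-1),(1,0),(1,1)]

def canAccessGo (grid : List (List Char)) (Y X y x : Int) : Int → List (Int × Int) → Bool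
  | _, [] => true
  | c, d :: ds =>
    if 0 ≤ y + d.1 ∧ y + d.1 < Y ∧ 0 ≤ x + d.2 ∧ x + d.2 < X then
      let c' := if cellA grid (y + d.1) (x + d.2) = '@' then c + 1 else c
      if 4 ≤ c' then false else canAccessGo grid Y X y x c' ds
    else canAccessGo grid Y X y x c ds

def canAccess (grid : List (List Char)) (Y X y x : Int) : Bool :=
  canAccessGo grid Y X y x 0 dirsA

def roundA (grid : List (List Char)) (Y X : Int) : Int × List (List Char) :=
  (PySem.List.pyRange 0 Y 1).foldl
    (fun acc i =>
      let inner := (PySem.List.pyRange 0 X 1).foldl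
        (fun (r : Int × List Char) j =>
          if cellA grid i j = '@' ∧ canAccess grid Y X i j = true
          then (r.1 + 1, r.2 ++ ['x'])
          else (r.1, r.2 ++ [cellA grid i j]))
        (acc.1, ([] : List Char))
      (inner.1, acc.2 ++ [inner.2]))
    (0, [])

-- A's 'while True' loop; each productive round removes ≥ 1 of the ≤ Y*X rolls,
-- so fuel Y.toNat * X.toNat + 1 never runs out on the loop A actually performs
def loopA (Y X : Int) : Nat → Int → List (List Char) → Int
  | 0, total, _ => total
  | f+1, total, grid =>
    let r := roundA grid Y X
    if r.1 = 0 then total + r.1 else loopA Y X f (total + r.1) r.2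

def part2 (raw_input : String) : Int :=
  let grid := (PySem.Str.splitlines raw_input).map String.toList
  let Y : Int := grid.length
  let X : Int := (grid.getD 0 []).length   -- Python's grid[0]: raises on empty grid, excluded by Pre_
  loopA Y X (Y.toNat * X.toNat + 1) 0 grid

-- ===== PORT B =====
-- B's neighbour offsets: (dy,dx) over (-1,0,1) x (-1,0,1) skipping (0,0)
def offsetsB : List (Int × Int) :=
  [(-1:Int), 0, 1].flatMap (fun dy =>
    [(-1:Int), 0, 1].filterMap (fun dx =>
      if (dy, dx) ≠ ((0:Int), (0:Int)) then some (dy, dx) else none))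

-- Source B's degree(y, x): number of live neighbours
def degreeB (alive : List (Int × Int)) (y x : Int) : Int :=
  offsetsB.foldl (fun c d => if (y + d.1, x + d.2) ∈ alive then c + 1 else c) 0

-- Source B's while loop; the stack's top is the list HEAD (Python appends/pops at the end).
-- Fuel: each iteration pops one entry and a removal pushes ≤ 8 while killing one roll,
-- so stack.length + 9 * alive.length decreases every iteration.
def peelB : Nat → List (Int × Int) → List (Int × Int) → Int → Int
  | 0, _, _, removed => removed
  | _ + 1, _, [], removed => removed
  | f + 1, alive, p :: rest, removed =>
    if p ∈ alive ∧ degreeB alive p.1 p.2 < 4 then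
      peelB f (alive.erase p)
        (offsetsB.foldl (fun st d =>
          if (p.1 + d.1, p.2 + d.2) ∈ alive.erase p
          then (p.1 + d.1, p.2 + d.2) :: st else st) rest)
        (removed + 1)
    else peelB f alive rest removed

def part2_alt (raw_input : String) : Int :=
  let lines := (PySem.Str.splitlines raw_input).map String.toList
  let X : Int := (lines.getD 0 []).length   -- Python's lines[0]: raises on empty input, excluded by Pre_
  let rolls := (PySem.List.enumerate lines).flatMap
    (fun yl => (PySem.List.pyRange 0 X 1).filterMap
      (fun x => if PySem.List.pyGetD yl.2 x ' ' = '@' then some (yl.1, x) else none))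
  let alive := PySem.Set.ofList rolls
  peelB (rolls.length + 9 * alive.length + 1) alive rolls.reverse 0

-- ===== PRECONDITION & SPEC =====
-- Pre_ excludes exactly the inputs where Python A raises: the empty input (grid[0] is an
-- IndexError) and inputs with a line shorter than the first (grid[i][j] is an IndexError).
def Pre_part2 (raw_input : String) : Prop :=
  (PySem.Str.splitlines raw_input).map String.toList ≠ [] ∧
  ∀ l ∈ (PySem.Str.splitlines raw_input).map String.toList,
    (((PySem.Str.splitlines raw_input).map String.toList).getD 0 []).length ≤ l.length
instance (raw_input : String) : Decidable (Pre_part2 raw_input) := by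
  unfold Pre_part2; infer_instance

def pvWitness_part2 : String := "@@@\n@@@"

def Spec_part2 (raw_input : String) (out : Int) : Prop := out = part2_alt raw_input
instance (raw_input : String) (out : Int) : Decidable (Spec_part2 raw_input out) := by
  unfold Spec_part2; infer_instance

-- ===== CLAIM (what is proved, stated in full; the proofs are below) =====
def Claim_equal_part2 : Prop := ∀ (raw_input : String), Dom_part2 raw_input → Pre_part2 raw_input → Spec_part2 raw_input (part2 raw_input)

-- ===== LEMMAS AND PROOFS =====

-- A-side restated on coordinates: the rolls of A's grid, and A's rounds as a
-- simultaneous filter loop on that list (lockstep below ties it to loopA).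
def rollsOf (grid : List (List Char)) (Y X : Int) : List (Int × Int) :=
  (PySem.List.pyRange 0 Y 1).flatMap
    (fun y => (PySem.List.pyRange 0 X 1).filterMap
      (fun x => if cellA grid y x = '@' then some (y, x) else none))

def loopS : Nat → Int → List (Int × Int) → Int
  | 0, total, _ => total
  | f+1, total, rolls =>
    if rolls = [] then total
    else
      let keep := rolls.filter (fun p => decide (4 ≤ degreeB rolls p.1 p.2))
      if keep.length = rolls.length then total
      else loopS f (total + ((rolls.length : Int) - (keep.length : Int))) keep

-- a set of rolls every member of which has ≥ 4 neighbours inside the set (a "4-core")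
def IsCore (S : List (Int × Int)) : Prop := ∀ p ∈ S, 4 ≤ degreeB S p.1 p.2

theorem flatMap_congr_mem {α β : Type} (l : List α) (f g : α → List β)
    (h : ∀ a ∈ l, f a = g a) : l.flatMap f = l.flatMap g := by
  induction l with
  | nil => rfl
  | cons a l ih =>
    simp only [List.flatMap_cons, h a (by simp)]
    rw [ih (fun a ha => h a (by simp [ha]))]

theorem length_filter_not_split {α : Type} (q : α → Bool) (l : List α) :
    l.length = (l.filter q).length + (l.filter (fun a => !q a)).length := by
  induction l with
  | nil => rfl
  | cons a l ih => by_cases h : q a <;> simp [h, ih] <;> omega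

theorem mem_rollsOf {grid : List (List Char)} {Y X : Int} {p : Int × Int} :
    p ∈ rollsOf grid Y X ↔
      0 ≤ p.1 ∧ p.1 < Y ∧ 0 ≤ p.2 ∧ p.2 < X ∧ cellA grid p.1 p.2 = '@' := by
  obtain ⟨y, x⟩ := p
  simp only [rollsOf, List.mem_flatMap, List.mem_filterMap, PySem.List.mem_pyRange_one,
    Option.ite_none_right_eq_some, Option.some.injEq, Prod.mk.injEq]
  constructor
  · rintro ⟨y', ⟨hy0, hyY⟩, x', ⟨hx0, hxX⟩, hc, rfl, rfl⟩
    exact ⟨hy0, hyY, hx0, hxX, hc⟩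
  · rintro ⟨hy0, hyY, hx0, hxX, hc⟩
    exact ⟨y, ⟨hy0, hyY⟩, x, ⟨hx0, hxX⟩, hc, rfl, rfl⟩

theorem degreeB_rollsOf (grid : List (List Char)) (Y X y x : Int) :
    degreeB (rollsOf grid Y X) y x =
      (dirsA.countP (fun d =>
        decide ((0 ≤ y + d.1 ∧ y + d.1 < Y ∧ 0 ≤ x + d.2 ∧ x + d.2 < X) ∧
          cellA grid (y + d.1) (x + d.2) = '@')) : Int) := by
  unfold degreeB
  rw [PySem.List.foldl_ite_add_one (fun d : Int × Int =>
    (y + d.1, x + d.2) ∈ rollsOf grid Y X) offsetsB 0, zero_add,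
    (by decide : offsetsB = dirsA)]
  norm_cast
  apply List.countP_congr
  intro d _
  simp only [decide_eq_true_eq, mem_rollsOf]
  tauto

theorem canAccessGo_eq (grid : List (List Char)) (Y X y x : Int) :
    ∀ (ds : List (Int × Int)) (c : Int), 0 ≤ c → c < 4 →
      canAccessGo grid Y X y x c ds =
        decide (c + (ds.countP (fun d =>
          decide ((0 ≤ y + d.1 ∧ y + d.1 < Y ∧ 0 ≤ x + d.2 ∧ x + d.2 < X) ∧
            cellA grid (y + d.1) (x + d.2) = '@')) : Int) < 4) := by
  intro ds
  induction ds with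
  | nil =>
    intro c h0 h4
    simp only [canAccessGo, List.countP_nil, Nat.cast_zero, add_zero]
    simp [h4]
  | cons d ds ih =>
    intro c h0 h4
    simp only [canAccessGo]
    by_cases hin : 0 ≤ y + d.1 ∧ y + d.1 < Y ∧ 0 ≤ x + d.2 ∧ x + d.2 < X
    · rw [if_pos hin]
      by_cases hc : cellA grid (y + d.1) (x + d.2) = '@'
      · rw [if_pos hc, List.countP_cons_of_pos (by simp [hin, hc])]
        by_cases h41 : (4:Int) ≤ c + 1
        · rw [if_pos h41]
          have h1 : ¬ (c + ((ds.countP (fun d =>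
              decide ((0 ≤ y + d.1 ∧ y + d.1 < Y ∧ 0 ≤ x + d.2 ∧ x + d.2 < X) ∧
                cellA grid (y + d.1) (x + d.2) = '@')) + 1 : Nat) : Int) < 4) := by
            push_cast
            omega
          exact (decide_eq_false h1).symm
        · rw [if_neg h41, ih (c + 1) (by omega) (by omega)]
          simp only [decide_eq_decide]
          push_cast
          omega
      · rw [if_neg hc, if_neg (by omega : ¬ (4:Int) ≤ c), ih c h0 h4,
          List.countP_cons_of_neg (by simp [hc])]
    · rw [if_neg hin, ih c h0 h4, List.countP_cons_of_neg (by simp [hin])]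

theorem canAccess_iff (grid : List (List Char)) (Y X y x : Int) :
    canAccess grid Y X y x = decide (degreeB (rollsOf grid Y X) y x < 4) := by
  unfold canAccess
  rw [canAccessGo_eq grid Y X y x dirsA 0 le_rfl (by norm_num), degreeB_rollsOf]
  simp only [decide_eq_decide]
  omega

theorem roundA_eq (grid : List (List Char)) (Y X : Int) :
    roundA grid Y X =
      ((((PySem.List.pyRange 0 Y 1).map (fun i =>
          ((PySem.List.pyRange 0 X 1).countP (fun j =>
            decide (cellA grid i j = '@' ∧ canAccess grid Y X i j = true)) : Int))).sum),
       (PySem.List.pyRange 0 Y 1).map (fun i =>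
         (PySem.List.pyRange 0 X 1).map (fun j =>
           if cellA grid i j = '@' ∧ canAccess grid Y X i j = true then 'x'
           else cellA grid i j))) := by
  have inner : ∀ (i : Int) (c0 : Int),
      (PySem.List.pyRange 0 X 1).foldl
        (fun (r : Int × List Char) j =>
          if cellA grid i j = '@' ∧ canAccess grid Y X i j = true
          then (r.1 + 1, r.2 ++ ['x'])
          else (r.1, r.2 ++ [cellA grid i j])) (c0, ([] : List Char))
      = (c0 + ((PySem.List.pyRange 0 X 1).countP (fun j =>
            decide (cellA grid i j = '@' ∧ canAccess grid Y X i j = true)) : Int),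
         (PySem.List.pyRange 0 X 1).map (fun j =>
           if cellA grid i j = '@' ∧ canAccess grid Y X i j = true then 'x'
           else cellA grid i j)) := by
    intro i c0
    have hstep : (fun (r : Int × List Char) j =>
          if cellA grid i j = '@' ∧ canAccess grid Y X i j = true
          then (r.1 + 1, r.2 ++ ['x'])
          else (r.1, r.2 ++ [cellA grid i j]))
        = (fun (r : Int × List Char) j =>
            ((fun (a : Int) (j : Int) =>
               if cellA grid i j = '@' ∧ canAccess grid Y X i j = true then a + 1 else a) r.1 j,
             (fun (b : List Char) (j : Int) =>
               b ++ [if cellA grid i j = '@' ∧ canAccess grid Y X i j = true then 'x'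
                     else cellA grid i j]) r.2 j)) := by
      funext r j
      by_cases h : cellA grid i j = '@' ∧ canAccess grid Y X i j = true <;> simp [h]
    rw [hstep, PySem.List.foldl_prod_mk
      (f := fun (a : Int) (j : Int) =>
        if cellA grid i j = '@' ∧ canAccess grid Y X i j = true then a + 1 else a)
      (g := fun (b : List Char) (j : Int) =>
        b ++ [if cellA grid i j = '@' ∧ canAccess grid Y X i j = true then 'x'
              else cellA grid i j]),
      PySem.List.foldl_ite_add_one, PySem.List.foldl_append_singleton_eq_map]
    simp
  unfold roundA
  rw [PySem.List.foldl_congr_mem (PySem.List.pyRange 0 Y 1) _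
    (fun (acc : Int × List (List Char)) i =>
      (acc.1 + ((PySem.List.pyRange 0 X 1).countP (fun j =>
          decide (cellA grid i j = '@' ∧ canAccess grid Y X i j = true)) : Int),
       acc.2 ++ [(PySem.List.pyRange 0 X 1).map (fun j =>
         if cellA grid i j = '@' ∧ canAccess grid Y X i j = true then 'x'
         else cellA grid i j)]))
    (0, []) (by intro acc i _; rw [inner i acc.1])]
  rw [PySem.List.foldl_prod_mk
    (f := fun (a : Int) (i : Int) =>
      a + ((PySem.List.pyRange 0 X 1).countP (fun j =>
        decide (cellA grid i j = '@' ∧ canAccess grid Y X i j = true)) : Int))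
    (g := fun (b : List (List Char)) (i : Int) =>
      b ++ [(PySem.List.pyRange 0 X 1).map (fun j =>
        if cellA grid i j = '@' ∧ canAccess grid Y X i j = true then 'x'
        else cellA grid i j)]),
    PySem.List.foldl_add, PySem.List.foldl_append_singleton_eq_map]
  simp

theorem roundA_fst (grid : List (List Char)) (Y X : Int) :
    (roundA grid Y X).1
      = (((PySem.List.pyRange 0 Y 1).map (fun i =>
          ((PySem.List.pyRange 0 X 1).countP (fun j =>
            decide (cellA grid i j = '@' ∧ canAccess grid Y X i j = true)) : Int))).sum) := by
  rw [roundA_eq]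

theorem roundA_snd (grid : List (List Char)) (Y X : Int) :
    (roundA grid Y X).2
      = (PySem.List.pyRange 0 Y 1).map (fun i =>
          (PySem.List.pyRange 0 X 1).map (fun j =>
            if cellA grid i j = '@' ∧ canAccess grid Y X i j = true then 'x'
            else cellA grid i j)) := by
  rw [roundA_eq]

theorem filterMap_ite_length {α β : Type} (l : List α) (C : α → Prop) [DecidablePred C]
    (g : α → β) :
    (l.filterMap (fun x => if C x then some (g x) else none)).length
      = l.countP (fun x => decide (C x)) := by
  induction l with
  | nil => rfl
  | cons a l ih => by_cases h : C a <;> simp [h, ih]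

theorem option_filter_ite {α : Type} (q : α → Bool) (c : Prop) [Decidable c] (a : α) :
    Option.filter q (if c then some a else none)
      = if c ∧ q a = true then some a else none := by
  by_cases h : c <;> by_cases hq : q a <;> simp [h, hq, Option.filter]

theorem filter_rollsOf (grid : List (List Char)) (Y X : Int) (q : Int × Int → Bool) :
    (rollsOf grid Y X).filter q
      = (PySem.List.pyRange 0 Y 1).flatMap
          (fun y => (PySem.List.pyRange 0 X 1).filterMap
            (fun x => if cellA grid y x = '@' ∧ q (y, x) = true then some (y, x) else none)) := by
  unfold rollsOf
  rw [List.filter_flatMap]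
  simp only [List.filter_filterMap, option_filter_ite]

theorem roundA_count_aux (grid : List (List Char)) (Y X : Int) :
    (roundA grid Y X).1
      = (((rollsOf grid Y X).filter
          (fun p => !decide (4 ≤ degreeB (rollsOf grid Y X) p.1 p.2))).length : Int) := by
  rw [roundA_fst, filter_rollsOf, List.length_flatMap]
  simp only [filterMap_ite_length]
  rw [Nat.cast_list_sum, List.map_map]
  congr 1
  apply List.map_congr_left
  intro y _
  simp only [Function.comp_def]
  norm_cast
  apply List.countP_congr
  intro x _
  simp only [decide_eq_true_eq, canAccess_iff, Bool.not_eq_true', decide_eq_false_iff_not,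
    not_le]

theorem roundA_count (grid : List (List Char)) (Y X : Int) :
    ((roundA grid Y X).1 : Int)
      = ((rollsOf grid Y X).length : Int)
        - (((rollsOf grid Y X).filter
            (fun p => decide (4 ≤ degreeB (rollsOf grid Y X) p.1 p.2))).length : Int) := by
  rw [roundA_count_aux]
  have := length_filter_not_split
    (fun p => decide (4 ≤ degreeB (rollsOf grid Y X) p.1 p.2)) (rollsOf grid Y X)
  omega

theorem cellA_map_pyRange (F : Int → Int → Char) (Y X y x : Int)
    (hy : 0 ≤ y) (hY : y < Y) (hx : 0 ≤ x) (hX : x < X) :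
    cellA ((PySem.List.pyRange 0 Y 1).map (fun i =>
      (PySem.List.pyRange 0 X 1).map (fun j => F i j))) y x = F y x := by
  unfold cellA
  rw [PySem.List.pyRange_one 0 Y, List.map_map]
  rw [PySem.List.getD_map_range _ _ y.toNat _ (by omega)]
  simp only [Function.comp_def, zero_add]
  rw [PySem.List.pyRange_one 0 X, List.map_map]
  rw [PySem.List.getD_map_range _ _ x.toNat _ (by omega)]
  simp only [Function.comp_def, zero_add, Int.toNat_of_nonneg hy, Int.toNat_of_nonneg hx]

theorem rollsOf_map (F : Int → Int → Char) (Y X : Int) :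
    rollsOf ((PySem.List.pyRange 0 Y 1).map (fun i =>
        (PySem.List.pyRange 0 X 1).map (fun j => F i j))) Y X
      = (PySem.List.pyRange 0 Y 1).flatMap
          (fun y => (PySem.List.pyRange 0 X 1).filterMap
            (fun x => if F y x = '@' then some (y, x) else none)) := by
  unfold rollsOf
  apply flatMap_congr_mem
  intro y hy
  rw [PySem.List.mem_pyRange_one] at hy
  apply List.filterMap_congr
  intro x hx
  rw [PySem.List.mem_pyRange_one] at hx
  rw [cellA_map_pyRange F Y X y x hy.1 hy.2 hx.1 hx.2]

theorem roundA_grid (grid : List (List Char)) (Y X : Int) :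
    rollsOf (roundA grid Y X).2 Y X
      = (rollsOf grid Y X).filter
          (fun p => decide (4 ≤ degreeB (rollsOf grid Y X) p.1 p.2)) := by
  rw [roundA_snd, rollsOf_map, filter_rollsOf]
  apply flatMap_congr_mem
  intro y hy
  rw [PySem.List.mem_pyRange_one] at hy
  apply List.filterMap_congr
  intro x hx
  rw [PySem.List.mem_pyRange_one] at hx
  have haccess : canAccess grid Y X y x = true ↔ degreeB (rollsOf grid Y X) y x < 4 := by
    rw [canAccess_iff]; simp
  by_cases hc : cellA grid y x = '@'
  · by_cases hd : (4:Int) ≤ degreeB (rollsOf grid Y X) y x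
    · have hP : ¬ (cellA grid y x = '@' ∧ canAccess grid Y X y x = true) := by
        rintro ⟨-, ha⟩
        rw [haccess] at ha
        omega
      rw [if_neg hP, if_pos hc, if_pos ⟨hc, by simp [hd]⟩]
    · have hP : cellA grid y x = '@' ∧ canAccess grid Y X y x = true :=
        ⟨hc, haccess.mpr (by omega)⟩
      rw [if_pos hP, if_neg (by decide : ¬ ('x' = '@')),
        if_neg (by simp [hd] : ¬ (cellA grid y x = '@' ∧ decide (4 ≤ degreeB (rollsOf grid Y X) y x) = true))]
  · have hP : ¬ (cellA grid y x = '@' ∧ canAccess grid Y X y x = true) := fun h => hc h.1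
    rw [if_neg hP, if_neg hc, if_neg (fun h => hc h.1)]

theorem rollsOf_length_le (grid : List (List Char)) (Y X : Int) :
    (rollsOf grid Y X).length ≤ Y.toNat * X.toNat := by
  unfold rollsOf
  rw [List.length_flatMap]
  have h1 : ∀ n ∈ ((PySem.List.pyRange 0 Y 1).map (fun y =>
      ((PySem.List.pyRange 0 X 1).filterMap
        (fun x => if cellA grid y x = '@' then some (y, x) else none)).length)), n ≤ X.toNat := by
    intro n hn
    rw [List.mem_map] at hn
    obtain ⟨y, _, rfl⟩ := hn
    refine le_trans (List.length_filterMap_le _ _) ?_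
    rw [PySem.List.length_pyRange_one]
    omega
  refine le_trans (List.sum_le_card_nsmul _ _ h1) ?_
  rw [List.length_map, PySem.List.length_pyRange_one, smul_eq_mul]
  simp

theorem lockstep (Y X : Int) :
    ∀ (fA : Nat) (grid : List (List Char)) (total : Int) (fB : Nat),
      (rollsOf grid Y X).length < fA → (rollsOf grid Y X).length < fB →
      loopA Y X fA total grid = loopS fB total (rollsOf grid Y X) := by
  intro fA
  induction fA with
  | zero => intro grid total fB h _; omega
  | succ f ih =>
    intro grid total fB hA hB
    obtain ⟨g, rfl⟩ : ∃ g, fB = g + 1 := ⟨fB - 1, by omega⟩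
    have hcount := roundA_count grid Y X
    have hgrid := roundA_grid grid Y X
    simp only [loopA, loopS]
    by_cases hnil : rollsOf grid Y X = []
    · rw [if_pos hnil]
      have hc0 : (roundA grid Y X).1 = 0 := by
        rw [hnil] at hcount
        simpa using hcount
      simp [hc0]
    · rw [if_neg hnil]
      by_cases heq : ((rollsOf grid Y X).filter
          (fun p => decide (4 ≤ degreeB (rollsOf grid Y X) p.1 p.2))).length
          = (rollsOf grid Y X).length
      · have hc0 : (roundA grid Y X).1 = 0 := by omega
        rw [if_pos heq]
        simp [hc0]
      · have hle := List.length_filter_le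
          (fun p => decide (4 ≤ degreeB (rollsOf grid Y X) p.1 p.2)) (rollsOf grid Y X)
        have hcne : ¬ (roundA grid Y X).1 = 0 := by omega
        rw [if_neg hcne, if_neg heq]
        have htot : total + (roundA grid Y X).1
            = total + (((rollsOf grid Y X).length : Int)
                - (((rollsOf grid Y X).filter
                    (fun p => decide (4 ≤ degreeB (rollsOf grid Y X) p.1 p.2))).length : Int)) := by
          omega
        rw [htot, ← hgrid]
        exact ih (roundA grid Y X).2 _ g (by rw [hgrid]; omega) (by rw [hgrid]; omega)

theorem rolls_init (lines : List (List Char)) (X : Int) :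
    (PySem.List.enumerate lines).flatMap
      (fun yl => (PySem.List.pyRange 0 X 1).filterMap
        (fun x => if PySem.List.pyGetD yl.2 x ' ' = '@' then some (yl.1, x) else none))
      = rollsOf lines (lines.length : Int) X := by
  rw [PySem.List.enumerate_eq_map_pyRange lines ([] : List Char), List.flatMap_map,
    PySem.List.len_eq]
  unfold rollsOf
  apply flatMap_congr_mem
  intro y hy
  rw [PySem.List.mem_pyRange_one] at hy
  apply List.filterMap_congr
  intro x hx
  rw [PySem.List.mem_pyRange_one] at hx
  have h1 : PySem.List.pyGetD lines y [] = lines.getD y.toNat [] := by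
    conv_lhs => rw [show y = ((y.toNat : Nat) : Int) from by omega]
    rw [PySem.List.pyGetD_natCast]
  have h2 : PySem.List.pyGetD (lines.getD y.toNat []) x ' '
      = (lines.getD y.toNat []).getD x.toNat ' ' := by
    conv_lhs => rw [show x = ((x.toNat : Nat) : Int) from by omega]
    rw [PySem.List.pyGetD_natCast]
  simp only [h1, h2]
  rfl

-- ---- degree toolbox ----

theorem degree_countP (S : List (Int × Int)) (y x : Int) :
    degreeB S y x = (offsetsB.countP (fun d => decide ((y + d.1, x + d.2) ∈ S)) : Int) := by
  unfold degreeB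
  rw [PySem.List.foldl_ite_add_one (fun d : Int × Int => (y + d.1, x + d.2) ∈ S) offsetsB 0,
    zero_add]

theorem degree_mono {S T : List (Int × Int)} (h : ∀ q ∈ S, q ∈ T) (y x : Int) :
    degreeB S y x ≤ degreeB T y x := by
  rw [degree_countP, degree_countP]
  exact_mod_cast List.countP_mono_left (fun d _ hd => by
    simp only [decide_eq_true_eq] at hd ⊢
    exact h _ hd)

theorem offsets_neg : ∀ d ∈ offsetsB, (-d.1, -d.2) ∈ offsetsB := by decide

theorem degree_erase_eq {alive : List (Int × Int)} (hnd : alive.Nodup)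
    (p : Int × Int) (y x : Int)
    (h : ∀ d ∈ offsetsB, (y + d.1, x + d.2) ≠ p) :
    degreeB (alive.erase p) y x = degreeB alive y x := by
  rw [degree_countP, degree_countP]
  congr 1
  apply List.countP_congr
  intro d hd
  have hne := h d hd
  simp only [decide_eq_true_eq, List.Nodup.mem_erase_iff hnd]
  tauto

theorem mem_foldl_cons_if {α β : Type} (l : List α) (P : α → Prop) [DecidablePred P]
    (g : α → β) (st : List β) (q : β) :
    (q ∈ l.foldl (fun st d => if P d then g d :: st else st) st) ↔
      q ∈ st ∨ ∃ d ∈ l, P d ∧ q = g d := by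
  induction l generalizing st with
  | nil => simp
  | cons a l ih =>
    simp only [List.foldl_cons]
    by_cases h : P a
    · rw [if_pos h, ih]
      simp only [List.mem_cons]
      constructor
      · rintro ((rfl | hq) | ⟨d, hd, hP, rfl⟩)
        · exact Or.inr ⟨a, Or.inl rfl, h, rfl⟩
        · exact Or.inl hq
        · exact Or.inr ⟨d, Or.inr hd, hP, rfl⟩
      · rintro (hq | ⟨d, rfl | hd, hP, rfl⟩)
        · exact Or.inl (Or.inr hq)
        · exact Or.inl (Or.inl rfl)
        · exact Or.inr ⟨d, hd, hP, rfl⟩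
    · rw [if_neg h, ih]
      simp only [List.mem_cons]
      constructor
      · rintro (hq | ⟨d, hd, hP, rfl⟩)
        · exact Or.inl hq
        · exact Or.inr ⟨d, Or.inr hd, hP, rfl⟩
      · rintro (hq | ⟨d, rfl | hd, hP, rfl⟩)
        · exact Or.inl hq
        · exact absurd hP h
        · exact Or.inr ⟨d, hd, hP, rfl⟩

theorem length_foldl_cons_if {α β : Type} (l : List α) (P : α → Prop) [DecidablePred P]
    (g : α → β) (st : List β) :
    (l.foldl (fun st d => if P d then g d :: st else st) st).length ≤ st.length + l.length := by
  induction l generalizing st with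
  | nil => simp
  | cons a l ih =>
    simp only [List.foldl_cons, List.length_cons]
    by_cases h : P a
    · rw [if_pos h]
      have := ih (g a :: st)
      simp only [List.length_cons] at this
      omega
    · rw [if_neg h]
      have := ih st
      omega

-- ---- B's peeling reaches the maximal 4-core ----

theorem peel_spec : ∀ (fuel : Nat) (alive stack : List (Int × Int)) (removed : Int),
    stack.length + 9 * alive.length < fuel →
    alive.Nodup →
    (∀ p ∈ alive, degreeB alive p.1 p.2 < 4 → p ∈ stack) →
    ∃ final : List (Int × Int),
      peelB fuel alive stack removed
          = removed + (alive.length : Int) - (final.length : Int) ∧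
        final.Nodup ∧ (∀ q ∈ final, q ∈ alive) ∧ IsCore final ∧
        (∀ C, IsCore C → (∀ q ∈ C, q ∈ alive) → ∀ q ∈ C, q ∈ final) := by
  intro fuel
  induction fuel with
  | zero => intro alive stack removed hm _ _; omega
  | succ f ih =>
    intro alive stack removed hm hnd hstk
    match stack with
    | [] =>
      refine ⟨alive, by simp [peelB], hnd, fun q hq => hq, ?_, fun C _ hC q hq => hC q hq⟩
      intro p hp
      by_contra hlt
      exact absurd (hstk p hp (by omega)) (by simp)
    | p :: rest =>
      by_cases hcond : p ∈ alive ∧ degreeB alive p.1 p.2 < 4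
      · obtain ⟨hpA, hpd⟩ := hcond
        have hmemA' : ∀ q, q ∈ alive.erase p ↔ q ≠ p ∧ q ∈ alive :=
          fun q => List.Nodup.mem_erase_iff hnd
        have hlenA' : (alive.erase p).length = alive.length - 1 :=
          List.length_erase_of_mem hpA
        have hposA : 0 < alive.length := List.length_pos_of_mem hpA
        have hpush := length_foldl_cons_if offsetsB
          (fun d => (p.1 + d.1, p.2 + d.2) ∈ alive.erase p)
          (fun d => (p.1 + d.1, p.2 + d.2)) rest
        have hlen8 : offsetsB.length = 8 := by decide
        simp only [List.length_cons] at hm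
        have hinv : ∀ q ∈ alive.erase p,
            degreeB (alive.erase p) q.1 q.2 < 4 →
            q ∈ offsetsB.foldl (fun st d =>
              if (p.1 + d.1, p.2 + d.2) ∈ alive.erase p
              then (p.1 + d.1, p.2 + d.2) :: st else st) rest := by
          intro q hq hdq
          rw [mem_foldl_cons_if]
          obtain ⟨hqp, hqA⟩ := (hmemA' q).mp hq
          by_cases hda : degreeB alive q.1 q.2 < 4
          · rcases List.mem_cons.mp (hstk q hqA hda) with h | h
            · exact absurd h hqp
            · exact Or.inl h
          · have hdiff : degreeB (alive.erase p) q.1 q.2 ≠ degreeB alive q.1 q.2 := by omega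
            have hex : ∃ d ∈ offsetsB, (q.1 + d.1, q.2 + d.2) = p := by
              by_contra hno
              push Not at hno
              exact hdiff (degree_erase_eq hnd p q.1 q.2 hno)
            obtain ⟨d, hd, hdp⟩ := hex
            refine Or.inr ⟨(-d.1, -d.2), offsets_neg d hd, ?_, ?_⟩
            · have h1 : p.1 = q.1 + d.1 := by rw [← hdp]
              have h2 : p.2 = q.2 + d.2 := by rw [← hdp]
              have : (p.1 + -d.1, p.2 + -d.2) = q := by
                obtain ⟨qa, qb⟩ := q
                simp only [Prod.mk.injEq] at h1 h2 ⊢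
                constructor <;> omega
              rw [this]
              exact hq
            · have h1 : p.1 = q.1 + d.1 := by rw [← hdp]
              have h2 : p.2 = q.2 + d.2 := by rw [← hdp]
              obtain ⟨qa, qb⟩ := q
              simp only [Prod.mk.injEq] at h1 h2 ⊢
              constructor <;> omega
        obtain ⟨final, heq, hfnd, hfsub, hfcore, hfmax⟩ :=
          ih (alive.erase p)
            (offsetsB.foldl (fun st d =>
              if (p.1 + d.1, p.2 + d.2) ∈ alive.erase p
              then (p.1 + d.1, p.2 + d.2) :: st else st) rest)
            (removed + 1)
            (by omega)
            (hnd.erase p)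
            hinv
        refine ⟨final, ?_, hfnd, ?_, hfcore, ?_⟩
        · show peelB (f + 1) alive (p :: rest) removed = _
          rw [peelB, if_pos ⟨hpA, hpd⟩, heq]
          omega
        · intro q hq
          exact ((hmemA' q).mp (hfsub q hq)).2
        · intro C hCcore hCsub q hq
          have hCsub' : ∀ r ∈ C, r ∈ alive.erase p := by
            intro r hr
            rw [hmemA' r]
            refine ⟨?_, hCsub r hr⟩
            rintro rfl
            have h1 : (4:Int) ≤ degreeB C r.1 r.2 := hCcore r hr
            have h2 := degree_mono hCsub r.1 r.2
            omega
          exact hfmax C hCcore hCsub' q hq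
      · have hinv : ∀ q ∈ alive, degreeB alive q.1 q.2 < 4 → q ∈ rest := by
          intro q hq hdq
          rcases List.mem_cons.mp (hstk q hq hdq) with h | h
          · exact absurd (h ▸ ⟨hq, hdq⟩) hcond
          · exact h
        obtain ⟨final, heq, hfnd, hfsub, hfcore, hfmax⟩ :=
          ih alive rest removed (by simp only [List.length_cons] at hm; omega) hnd hinv
        refine ⟨final, ?_, hfnd, hfsub, hfcore, hfmax⟩
        show peelB (f + 1) alive (p :: rest) removed = _
        rw [peelB, if_neg hcond, heq]

-- ---- A's simultaneous rounds reach the maximal 4-core ----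

theorem loopS_spec : ∀ (fuel : Nat) (g : List (Int × Int)) (total : Int),
    g.length < fuel → g.Nodup →
    ∃ final : List (Int × Int),
      loopS fuel total g = total + (g.length : Int) - (final.length : Int) ∧
        final.Nodup ∧ (∀ q ∈ final, q ∈ g) ∧ IsCore final ∧
        (∀ C, IsCore C → (∀ q ∈ C, q ∈ g) → ∀ q ∈ C, q ∈ final) := by
  intro fuel
  induction fuel with
  | zero => intro g total hm _; omega
  | succ f ih =>
    intro g total hm hnd
    by_cases hnil : g = []
    · subst hnil
      exact ⟨[], by simp [loopS], by simp, by simp, by simp [IsCore],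
        fun C _ hC q hq => hC q hq⟩
    · by_cases hkeep : (g.filter (fun p => decide (4 ≤ degreeB g p.1 p.2))).length = g.length
      · refine ⟨g, ?_, hnd, fun q hq => hq, ?_, fun C _ hC q hq => hC q hq⟩
        · simp only [loopS, if_neg hnil, if_pos hkeep]
          omega
        · intro p hp
          have := (List.length_filter_eq_length_iff).mp hkeep p hp
          simpa using this
      · have hsub : ∀ C, IsCore C → (∀ q ∈ C, q ∈ g) →
            ∀ q ∈ C, q ∈ g.filter (fun p => decide (4 ≤ degreeB g p.1 p.2)) := by
          intro C hCcore hCsub q hq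
          rw [List.mem_filter]
          refine ⟨hCsub q hq, ?_⟩
          have h1 : (4:Int) ≤ degreeB C q.1 q.2 := hCcore q hq
          have h2 := degree_mono hCsub q.1 q.2
          simp only [decide_eq_true_eq]
          omega
        have hle := List.length_filter_le (fun p => decide (4 ≤ degreeB g p.1 p.2)) g
        obtain ⟨final, heq, hfnd, hfsub, hfcore, hfmax⟩ :=
          ih (g.filter (fun p => decide (4 ≤ degreeB g p.1 p.2)))
            (total + ((g.length : Int) - ((g.filter (fun p => decide (4 ≤ degreeB g p.1 p.2))).length : Int)))
            (by omega) (hnd.filter _)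
        refine ⟨final, ?_, hfnd, ?_, hfcore, ?_⟩
        · simp only [loopS, if_neg hnil, if_neg hkeep]
          rw [heq]
          omega
        · intro q hq
          exact List.mem_of_mem_filter (hfsub q hq)
        · intro C hCcore hCsub q hq
          exact hfmax C hCcore (hsub C hCcore hCsub) q hq

-- ---- the roll list has no duplicates ----

theorem nodup_flatMap_key {α β : Type} (ys : List α) (f : α → List β) (key : β → α)
    (hys : ys.Nodup) (hin : ∀ y, (f y).Nodup) (hkey : ∀ y, ∀ b ∈ f y, key b = y) :
    (ys.flatMap f).Nodup := by
  induction ys with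
  | nil => simp
  | cons y ys ih =>
    rw [List.flatMap_cons, List.nodup_append]
    refine ⟨hin y, ih hys.of_cons, ?_⟩
    intro b hb c hc
    rw [List.mem_flatMap] at hc
    obtain ⟨y', hy', hc'⟩ := hc
    intro hbc
    subst hbc
    have e1 := hkey y b hb
    have e2 := hkey y' b hc'
    rw [e1] at e2
    exact (List.nodup_cons.mp hys).1 (e2 ▸ hy')

theorem nodup_rollsOf (grid : List (List Char)) (Y X : Int) : (rollsOf grid Y X).Nodup := by
  unfold rollsOf
  apply nodup_flatMap_key _ _ (fun p : Int × Int => p.1)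
  · exact PySem.List.nodup_pyRange_one 0 Y
  · intro y
    apply List.Nodup.filterMap _ (PySem.List.nodup_pyRange_one 0 X)
    intro x x' b hb hb'
    simp only [Option.mem_def] at hb hb'
    split_ifs at hb hb'
    cases hb
    cases hb'
    rfl
  · intro y b hb
    rw [List.mem_filterMap] at hb
    obtain ⟨x, _, hx⟩ := hb
    split_ifs at hx
    simp only [Option.some.injEq] at hx
    exact (congrArg Prod.fst hx).symm

-- ---- two maximal cores have the same length ----

theorem core_length_eq {F G : List (Int × Int)}
    (hFnd : F.Nodup) (hGnd : G.Nodup)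
    (hFG : ∀ q ∈ F, q ∈ G) (hGF : ∀ q ∈ G, q ∈ F) :
    F.length = G.length := by
  rw [← List.toFinset_card_of_nodup hFnd, ← List.toFinset_card_of_nodup hGnd]
  congr 1
  ext q
  simp only [List.mem_toFinset]
  exact ⟨fun h => hFG q h, fun h => hGF q h⟩

-- ===== VERDICT (by name: the statement is the Claim_ definition above) =====
theorem part2_spec : Claim_equal_part2 := by
  intro raw _hdom _hpre
  unfold Spec_part2 part2 part2_alt
  dsimp only
  rw [rolls_init]
  set lines := (PySem.Str.splitlines raw).map String.toList with hl
  set X : Int := ((lines.getD 0 []).length : Int) with hX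
  set R := rollsOf lines (lines.length : Int) X with hR
  have hRnd : R.Nodup := nodup_rollsOf _ _ _
  have hof : PySem.Set.ofList R = R := PySem.Set.ofList_eq_self_of_nodup R hRnd
  rw [hof]
  -- A side: loopA = loopS, then loopS reaches the maximal core
  have hRlen := rollsOf_length_le lines (lines.length : Int) X
  rw [← hR] at hRlen
  have hlock : loopA (lines.length : Int) X (((lines.length : Int)).toNat * X.toNat + 1) 0 lines
      = loopS (R.length + 1) 0 R := by
    apply lockstep
    · rw [← hR]
      omega
    · rw [← hR]
      omega
  obtain ⟨FA, hAeq, hAnd, hAsub, hAcore, hAmax⟩ :=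
    loopS_spec (R.length + 1) R 0 (by omega) hRnd
  -- B side: peeling reaches the maximal core
  obtain ⟨FB, hBeq, hBnd, hBsub, hBcore, hBmax⟩ :=
    peel_spec (R.length + 9 * R.length + 1) R R.reverse 0
      (by simp only [List.length_reverse]; omega) hRnd
      (fun p hp _ => by simpa using hp)
  rw [hlock, hAeq, hBeq]
  have hlen : FA.length = FB.length := by
    apply core_length_eq hAnd hBnd
    · intro q hq
      exact hBmax FA hAcore hAsub q hq
    · intro q hq
      exact hAmax FB hBcore hBsub q hq
  rw [hlen]
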